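-- pv_equiv track=rewrite | github.com/baonguyen254/Py_for_DS | Algorithm_analysis/Lab1/18110053_PTTTT1/18110053_lab1.py | Bonus
-- ===== SOURCE A (Python) =====
-- from collections import defaultdict
--
-- def Bonus(A, a, b, k, n):
--     count_assign = 0
--     count_compare = 0
--
--     Sum = 0
--     counter = defaultdict(int)
--     i = 1
--     j = 1
--     count_assign += 4
--     while i < n:
--         count_compare += 2
--         if A[i] <= b and A[i] >= a:
--             counter[A[i]] += 1
--             count_assign +=1
--         i += 1
--         count_assign +=1
--     count_compare += 1
--     while j  < k:
--         count_compare += 2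
--         if j < k:
--             Sum = Sum + j
--             count_assign += 1
--         j += 1
--         count_assign += 1
--     count_compare +=1
--     return count_assign, count_compare
-- ===== SOURCE B (Python) =====
-- def Bonus(A, a, b, k, n):
--     hits = sum(1 for i in range(1, n) if a <= A[i] <= b)
--     m = max(n - 1, 0)
--     t = max(k - 1, 0)
--     return (4 + m + hits + 2 * t, 2 * m + 2 * t + 2)
-- ===== Notes on version B (the rewrite author's own statement) =====
-- stated objective: faster
-- what changed: The second loop (O(k) pure counter bookkeeping) collapses to closed-form arithmetic in k, and the first loop's per-iteration assignment/comparison bookkeeping collapses to arithmetic in n plus one comprehension counting in-range elements.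
import Mathlib
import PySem

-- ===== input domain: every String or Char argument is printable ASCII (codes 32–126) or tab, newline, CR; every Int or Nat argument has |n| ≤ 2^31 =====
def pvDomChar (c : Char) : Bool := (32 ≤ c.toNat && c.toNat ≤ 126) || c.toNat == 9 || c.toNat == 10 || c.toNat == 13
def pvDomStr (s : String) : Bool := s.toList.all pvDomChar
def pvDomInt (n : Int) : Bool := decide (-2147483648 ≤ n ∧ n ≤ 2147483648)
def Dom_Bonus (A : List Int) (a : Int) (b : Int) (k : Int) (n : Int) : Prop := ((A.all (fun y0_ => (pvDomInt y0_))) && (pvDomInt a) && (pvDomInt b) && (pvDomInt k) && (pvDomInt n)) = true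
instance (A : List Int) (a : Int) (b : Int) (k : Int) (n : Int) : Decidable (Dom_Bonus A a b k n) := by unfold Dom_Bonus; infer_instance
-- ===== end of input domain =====

-- B replaces both counting loops by closed-form arithmetic plus one in-range count over the same indices.

-- ===== PORT A =====
-- first while loop: fuel = number of iterations (n - i); state (i, counter, count_assign, count_compare)
def BonusLoop1 (A : List Int) (a b n : Int) : Nat → Int → PySem.Dict Int Int → Int → Int → Int × Int
  | 0, _, _, ca, cc => (ca, cc)
  | fuel+1, i, counter, ca, cc =>
    if i < n then
      let cc := cc + 2
      -- A[i]; Pre_Bonus guarantees the index is in range, .getD 0 is never the taken path there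
      let x := (PySem.List.pyGet? A i).getD 0
      if x ≤ b ∧ a ≤ x then
        BonusLoop1 A a b n fuel (i+1) (counter.insert x (counter.getD x 0 + 1)) (ca + 1 + 1) cc
      else
        BonusLoop1 A a b n fuel (i+1) counter (ca + 1) cc
    else (ca, cc)

-- second while loop: state (j, Sum, count_assign, count_compare)
def BonusLoop2 (k : Int) : Nat → Int → Int → Int → Int → Int × Int
  | 0, _, _, ca, cc => (ca, cc)
  | fuel+1, j, s, ca, cc =>
    if j < k then
      let cc := cc + 2
      if j < k then
        BonusLoop2 k fuel (j+1) (s + j) (ca + 1 + 1) cc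
      else
        BonusLoop2 k fuel (j+1) s (ca + 1) cc
    else (ca, cc)

def Bonus (A : List Int) (a : Int) (b : Int) (k : Int) (n : Int) : Int × Int :=
  let r1 := BonusLoop1 A a b n (n - 1).toNat 1 (PySem.Dict.mk []) 4 0
  let r2 := BonusLoop2 k (k - 1).toNat 1 0 r1.1 (r1.2 + 1)
  (r2.1, r2.2 + 1)

-- ===== PORT B =====
-- hits = sum(1 for i in range(1, n) if a <= A[i] <= b); Pre_Bonus keeps every A[i] in range, .getD 0 never taken
def Bonus_alt (A : List Int) (a : Int) (b : Int) (k : Int) (n : Int) : Int × Int :=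
  let hits : Int :=
    ((PySem.List.pyRange 1 n 1).countP
      (fun i => decide (a ≤ (PySem.List.pyGet? A i).getD 0 ∧ (PySem.List.pyGet? A i).getD 0 ≤ b)) : Int)
  let m : Int := max (n - 1) 0
  let t : Int := max (k - 1) 0
  (4 + m + hits + 2 * t, 2 * m + 2 * t + 2)

-- ===== PRECONDITION & SPEC =====
-- Pre_ excludes exactly the inputs where A raises IndexError (n ≥ 2 with n > len(A)); B raises there too.
def Pre_Bonus (A : List Int) (a : Int) (b : Int) (k : Int) (n : Int) : Prop :=
  n ≤ 1 ∨ n ≤ (A.length : Int)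
instance (A : List Int) (a : Int) (b : Int) (k : Int) (n : Int) : Decidable (Pre_Bonus A a b k n) := by unfold Pre_Bonus; infer_instance

def pvWitness_Bonus : List Int × Int × Int × Int × Int := ([1, 2, 3, 4], 2, 3, 5, 4)

def Spec_Bonus (A : List Int) (a : Int) (b : Int) (k : Int) (n : Int) (out : Int × Int) : Prop := out = Bonus_alt A a b k n
instance (A : List Int) (a : Int) (b : Int) (k : Int) (n : Int) (out : Int × Int) : Decidable (Spec_Bonus A a b k n out) := by unfold Spec_Bonus; infer_instance

-- ===== CLAIM (what is proved, stated in full; the proofs are below) =====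
def Claim_equal_Bonus : Prop := ∀ (A : List Int) (a : Int) (b : Int) (k : Int) (n : Int), Dom_Bonus A a b k n → Pre_Bonus A a b k n → Spec_Bonus A a b k n (Bonus A a b k n)

-- ===== LEMMAS AND PROOFS =====

lemma loop2_spec (k : Int) : ∀ (fuel : Nat) (j s ca cc : Int), j + fuel = k →
    BonusLoop2 k fuel j s ca cc = (ca + 2 * fuel, cc + 2 * fuel) := by
  intro fuel
  induction fuel with
  | zero => intro j s ca cc _; simp [BonusLoop2]
  | succ f ih =>
    intro j s ca cc h
    have hj : j < k := by push_cast at h ⊢; omega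
    simp only [BonusLoop2, if_pos hj]
    rw [ih (j+1) (s+j) (ca+1+1) (cc+2) (by push_cast at h ⊢; omega)]
    simp only [Prod.mk.injEq]
    constructor <;> (push_cast; ring)

lemma loop2_full (k ca cc : Int) :
    BonusLoop2 k (k-1).toNat 1 0 ca cc = (ca + 2 * max (k - 1) 0, cc + 2 * max (k - 1) 0) := by
  by_cases h : 1 < k
  · rw [loop2_spec k (k-1).toNat 1 0 ca cc (by omega)]
    have : ((k-1).toNat : Int) = max (k - 1) 0 := by omega
    rw [this]
  · have h0 : (k-1).toNat = 0 := by omega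
    have hm : max (k - 1) 0 = 0 := by omega
    rw [h0, hm]
    simp [BonusLoop2]

lemma loop1_spec (A : List Int) (a b n : Int) (hn : n ≤ (A.length : Int)) :
    ∀ (fuel : Nat) (i ca cc : Int) (counter : PySem.Dict Int Int), 0 ≤ i → i + fuel = n →
    (BonusLoop1 A a b n fuel i counter ca cc) =
      (ca + fuel + ((PySem.List.pyRange i n 1).countP
          (fun j => decide (a ≤ (PySem.List.pyGet? A j).getD 0 ∧ (PySem.List.pyGet? A j).getD 0 ≤ b)) : Int),
       cc + 2 * fuel) := by
  intro fuel
  induction fuel with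
  | zero =>
    intro i ca cc counter _ h
    have : PySem.List.pyRange i n 1 = [] := PySem.List.pyRange_one_eq_nil (by omega)
    simp [BonusLoop1, this]
  | succ f ih =>
    intro i ca cc counter hi h
    have hj : i < n := by push_cast at h ⊢; omega
    have hcons : PySem.List.pyRange i n 1 = i :: PySem.List.pyRange (i+1) n 1 :=
      PySem.List.pyRange_one_cons hj
    simp only [BonusLoop1, if_pos hj]
    by_cases hp : (PySem.List.pyGet? A i).getD 0 ≤ b ∧ a ≤ (PySem.List.pyGet? A i).getD 0
    · rw [if_pos hp, ih (i+1) (ca+1+1) (cc+2) _ (by omega) (by push_cast at h ⊢; omega)]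
      rw [hcons]
      simp only [List.countP_cons, decide_eq_true (⟨hp.2, hp.1⟩ : a ≤ (PySem.List.pyGet? A i).getD 0 ∧ (PySem.List.pyGet? A i).getD 0 ≤ b), Prod.mk.injEq]
      constructor <;> (push_cast; ring)
    · rw [if_neg hp, ih (i+1) (ca+1) (cc+2) _ (by omega) (by push_cast at h ⊢; omega)]
      rw [hcons]
      simp only [List.countP_cons]
      rw [decide_eq_false (by tauto)]
      simp only [Prod.mk.injEq]
      constructor <;> (push_cast; ring)

-- ===== VERDICT (by name: the statement is the Claim_ definition above) =====
theorem Bonus_spec : Claim_equal_Bonus := by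
  intro A a b k n _ hpre
  unfold Spec_Bonus
  simp only [Bonus, Bonus_alt]
  rw [loop2_full]
  by_cases hn : 1 < n
  · have hlen : n ≤ (A.length : Int) := by
      rcases hpre with h | h
      · omega
      · exact h
    rw [loop1_spec A a b n hlen (n-1).toNat 1 4 0 (PySem.Dict.mk []) (by omega) (by omega)]
    have hfuel : ((n-1).toNat : Int) = max (n - 1) 0 := by omega
    rw [hfuel]
    simp only [Prod.mk.injEq]
    constructor
    · trivial
    · ring
  · have h0 : (n-1).toNat = 0 := by omega
    have hm : max (n - 1) 0 = 0 := by omega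
    have hr : PySem.List.pyRange 1 n 1 = [] := PySem.List.pyRange_one_eq_nil (by omega)
    rw [h0, hm, hr]
    simp only [BonusLoop1, List.countP_nil, Prod.mk.injEq]
    constructor <;> omega
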